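/- GENERATED by mk_final_copies.py from the proof of the farm's unit `decode_residue.1b` (farm:decode_residue.1b.1: Lemmas.lean) as the
   re-elaboration sweep compiled it — do not edit. -/
import Asan.CheckWalk
import Vorbis.Spec.Units.decode_residue_1b

/-!
  Lemmas of the proof unit `decode_residue.1b` (0x10ec95 – 0x10ed43 + 0x10ee02 – 0x10ee0c): the segment in FOUR walks, each from an
  assertion at the return of a check call to the next, so that the forks of `je 10ee02` and of the two `cmova` never multiply:

      lookup_walk   `At1b` (0x10ec95) → `AtQ`  (0x10ecfd, ret5)   the residue lookup (from the farm worker of `decode_residue.1`)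
      actual_walk   `AtQ`             → `MidA` (0x10ed1e, ret6)   `classwords`, `actual_size` (two paths)
      begin_walk    `MidA`            → `MidB` (0x10ed31, ret7)   `limit_r_begin` (two paths)
      end_walk      `MidB`            → `At1c` (0x10ed48, ret8)   `limit_r_end`, `n_read` (two paths)
-/

open X86 X86.User Asan Vorbis Vorbis.Spec Vorbis.Spec.DecodeResidue

set_option maxRecDepth 4000
set_option maxHeartbeats 4000000

namespace Vorbis.Spec.decode_residue_1b

/-! ### Bit-level forms -/

/-- `movsxd` of a 32-bit value below 2^31 is the value. -/
theorem sext_small (w : Word) (n : Nat) (hn : w.toNat % 2 ^ 32 = n) (h : n < 2 ^ 31) :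
    Word.ofBV (BitVec.signExtend 64 (Word.part .w32 w)) = UInt64.ofNat n := by
  apply UInt64.toNat_inj.mp
  rw [toNat_sext32 _ (by rw [toNat_part32]; omega), toNat_part32, UInt64.toNat_ofNat']
  omega

/-- The walker's form of `lea r13d, [rax + rax]` with `eax = n` (0x10ee08: `actual_size = 2·n` when `rtype = 2`) is `2·n`.
`u_omega` does not see through this form (the branch hypotheses `hbr_10ed24`, `hbr_10ed38` and the values of r12d, r13d, ebx at
0x10ed48 contain it): rewrite with this lemma first, then `omega` proves the `min` forms of the proposed assertion `AtR`. -/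
theorem toNat_double32 (n : Nat) (hn : n < 2 ^ 31) :
    (BitVec.setWidth 32 (Word.ofBV (BitVec.ofNat 32 n) + Word.ofBV (BitVec.ofNat 32 n)).toBitVec).toNat = 2 * n := by
  rw [BitVec.toNat_setWidth, UInt64.toNat_toBitVec, UInt64.toNat_add, toNat_ofBV32, BitVec.toNat_ofNat]
  omega

/-- `cmova r12d, r13d` taken (`2·n < begin`, the walker's `hbr_10ed24`): `limit_r_begin = min(begin, 2·n)` in the form of `AtR.r12`. -/
theorem cmova_taken_double (n bg : Nat) (hn : n < 2 ^ 31) (hbg : bg < 2 ^ 32)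
    (hbr : (BitVec.setWidth 32 (Word.ofBV (BitVec.ofNat 32 n) + Word.ofBV (BitVec.ofNat 32 n)).toBitVec).toNat <
      bg % 4294967296) :
    Word.ofBV (BitVec.setWidth 32 (Word.ofBV (BitVec.ofNat 32 n) + Word.ofBV (BitVec.ofNat 32 n)).toBitVec) =
      UInt64.ofNat (min bg (2 * n)) := by
  apply UInt64.toNat_inj.mp
  rw [toNat_double32 n hn] at hbr
  rw [toNat_ofBV32, toNat_double32 n hn, UInt64.toNat_ofNat']
  omega

/-- Every live object at the entry is live inside the function (the own frame's objects were added). -/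
theorem live_sub_frames' (g : G) : ∀ o, o ∈ stackObjs g.frames ++ g.others → o ∈ stackObjs g.frames' ++ g.others := by
  intro o ho
  unfold G.frames'
  rw [stackObjs_cons]
  rcases List.mem_append.mp ho with h | h
  · exact List.mem_append_left _ (List.mem_append_right _ h)
  · exact List.mem_append_right _ h

/-! ### Phase 2a: the residue lookup (0x10ec95 – 0x10ecfd) -/

/-- **A read off the stack region and inside the data space is not touched by the prologue**: the prologue wrote its own stack
frame and 12 shadow bytes only (`At1b.same`). -/
theorem read_after_prologue {m m' : Mem} {sp : Nat} (hsame : Mem.SameExcept [⟨sp - 256, sp⟩, shadowSpan (sp - 152) (sp - 56)] m m')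
    (hlo : 0x700000 + 848 ≤ sp) (hhi : sp + 8 ≤ 0x800000) (a : Word) (k : Nat)
    (hin : a.toNat + k ≤ 0xC00000) (hst : a.toNat + k ≤ 0x700000 ∨ 0x800000 ≤ a.toNat) :
    m'.readLE a k = m.readLE a k := by
  apply hsame.readLE a k (by omega)
  intro w hw
  simp only [List.mem_cons, List.mem_nil_iff, or_false] at hw
  rcases hw with rfl | rfl
  · simp only []
    omega
  · unfold shadowSpan
    simp only []
    omega

/-- A load of the walk in the memory after the prologue is the typed read of the entry memory: the address is the number `n`. -/
theorem fact_of_addr {m m' : Mem} {sp : Nat} (hsame : Mem.SameExcept [⟨sp - 256, sp⟩, shadowSpan (sp - 152) (sp - 56)] m m')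
    (hlo : 0x700000 + 848 ≤ sp) (hhi : sp + 8 ≤ 0x800000) {a : Word} {n : Nat} (k : Nat) (ha : a = addr n)
    (hin : n + k ≤ 0xC00000) (hst : n + k ≤ 0x700000 ∨ 0x800000 ≤ n) : m'.readLE a k = m.readLE (addr n) k := by
  subst ha
  have e : (addr n).toNat = n := toNat_addr _ (by omega)
  exact read_after_prologue hsame hlo hhi _ k (by rw [e]; exact hin) (by rw [e]; exact hst)

/-- **The assertion at 0x10ecfd** (`ret5`: after the check of `f->codebooks[r->classbook].dimensions`): the frame of `At1b`;
`r14 = r`, `rbx = cb` (the class book), `r13d = rtype` (also spilled to `[rbp−0xe0]`), `r15 = f`. -/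
structure AtQ (u₀ : State) (g : G) (v : State) : Prop where
  rip : v.rip = L.decode_residue.ret5
  rsp : v.reg .rsp = g.e.reg .rsp - 248
  rbp : v.reg .rbp = g.e.reg .rsp - 8
  r15 : v.reg .r15 = g.e.reg .rdi
  r14 : v.reg .r14 = addr g.r
  rbx : v.reg .rbx = addr (Residue.cbk g.e.mem g.f g.r)
  r13 : v.reg .r13 = Word.ofBV (BitVec.zeroExtend 32 (BitVec.ofNat 16 g.rtype))
  code : CodeOK u₀ v.mem
  inv : abiInv v
  s_rbp : UInt64.ofNat (v.mem.readLE (g.e.reg .rsp - 8) 8) = g.e.reg .rbp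
  s_r15 : UInt64.ofNat (v.mem.readLE (g.e.reg .rsp - 16) 8) = g.e.reg .r15
  s_r14 : UInt64.ofNat (v.mem.readLE (g.e.reg .rsp - 24) 8) = g.e.reg .r14
  s_r13 : UInt64.ofNat (v.mem.readLE (g.e.reg .rsp - 32) 8) = g.e.reg .r13
  s_r12 : UInt64.ofNat (v.mem.readLE (g.e.reg .rsp - 40) 8) = g.e.reg .r12
  s_rbx : UInt64.ofNat (v.mem.readLE (g.e.reg .rsp - 48) 8) = g.e.reg .rbx
  fr_f : UInt64.ofNat (v.mem.readLE (g.e.reg .rsp - 184) 8) = g.e.reg .rdi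
  fr_rb : UInt64.ofNat (v.mem.readLE (g.e.reg .rsp - 216) 8) = g.e.reg .rsi
  fr_ch : v.mem.readLE (g.e.reg .rsp - 156) 4 = g.ch
  sl_n : v.mem.readLE (g.e.reg .rsp - 208) 4 = g.n
  sl_dnd : UInt64.ofNat (v.mem.readLE (g.e.reg .rsp - 168) 8) = g.e.reg .r9
  fr_si : v.mem.readLE (g.e.reg .rsp - 240) 8 = (g.RA - 152) / 8
  fr_rtype : v.mem.readLE (g.e.reg .rsp - 232) 4 = g.rtype
  same : Mem.SameExcept [⟨g.RA - 256, g.RA⟩, shadowSpan (g.RA - 152) (g.RA - 56)] g.e.mem v.mem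
  shadow : ShadowInv g.others g.frames' (g.RA - 248) v.mem

/-- **Phase 2a**: from `ret1` (0x10ec95) to `ret5` (0x10ecfd): `r = f->residue_config + rn`, `rtype = f->residue_types[rn]`,
`r->classbook`, `f->codebooks`, the check of the class book's `dimensions`. Four check sites: two inside `*f` (OB1), one inside the
`residue_config` block (R2), one inside the codebooks block (CB0 + R7). The loads are named before the walk, as reads of the
memory after the prologue (`fact_of_addr`). -/
theorem lookup_walk {Lay : Layout} (hLay : Lay.hi = 0x1000000) {μ : Microarch} (hμ : UserX.MicroOK μ) {u₀ : State}
    (hcode : HasCodeNat Lay u₀ Vorbis.L.decode_residue.entry Vorbis.Code.code_decode_residue.nat Vorbis.L.decode_residue.size)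
    (hld8 : Asan.SmallCheck Lay μ Vorbis.WayInv (Vorbis.CodeOK u₀) [.rax, .rcx, .rdx] 8 Vorbis.L.__asan_load8_noabort.entry)
    (hld2 : Asan.SmallCheck Lay μ Vorbis.WayInv (Vorbis.CodeOK u₀) [.rax, .rcx, .rdx] 2 Vorbis.L.__asan_load2_noabort.entry)
    (hld1 : Asan.SmallCheck Lay μ Vorbis.WayInv (Vorbis.CodeOK u₀) [.rax, .rdx] 1 Vorbis.L.__asan_load1_noabort.entry)
    (hld4 : Asan.SmallCheck Lay μ Vorbis.WayInv (Vorbis.CodeOK u₀) [.rax, .rcx, .rdx] 4 Vorbis.L.__asan_load4_noabort.entry)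
    (g : G) (hent : Entered u₀ g) (v : State) (hat : At1b u₀ g v) :
    ReachVia Lay μ WayInv v (fun v' => AtQ u₀ g v') := by
  obtain ⟨e, hge⟩ : ∃ e, g.e = e := ⟨_, rfl⟩
  have he := hent.entry
  have hpre := hent.pre
  have hRA : g.RA = (e.reg .rsp).toNat := by
    unfold G.RA
    rw [hge]
  obtain ⟨w_rip, v_rsp, v_rbp, v_r15, v_rbx, hcodeok, hinvabi, sav_rbp, sav_r15, sav_r14, sav_r13, sav_r12, sav_rbx, fr_f, fr_rb, fr_ch, sl_n,
    sl_dnd, fr_si, hsame, hshadow⟩ := hat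
  rw [hge] at he hpre v_rsp v_rbp v_r15 v_rbx sav_rbp sav_r15 sav_r14 sav_r13 sav_r12 sav_rbx fr_f fr_rb fr_ch sl_n sl_dnd fr_si hsame
  rw [hRA] at hsame hshadow fr_si
  v_entry he
  have w_eq : Mem.EqOn Vorbis.L.textLo Vorbis.L.textHi u₀.mem v.mem := hcodeok
  have hdf : v.flags .df = false := (show abiInv _ from hinvabi).1
  have hmx : v.mxcsr &&& 0x1F80 = 0x1F80 := (show abiInv _ from hinvabi).2
  have hsse := Vorbis.sseOK_of_abiInv hinvabi
  -- ghosts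
  obtain ⟨f, hf⟩ : ∃ f : Nat, (e.reg .rdi).toNat = f := ⟨_, rfl⟩
  obtain ⟨rn, hrn⟩ : ∃ rn : Nat, (e.reg .r8).toNat % 2 ^ 32 = rn := ⟨_, rfl⟩
  have hgf : g.f = f := by
    unfold G.f
    rw [hge]
    exact hf
  have hgrn : g.rn = rn := by
    unfold G.rn
    rw [hge]
    exact hrn
  have hv : Real.VorbisOK g.len (RunBlk g.A g.len) e.mem f := hf ▸ hpre.vorbis
  have hok : BlkOK (RunBlk g.A g.len) := hpre.env.ok
  have hargs := hpre.args
  rw [hf, hrn] at hargs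
  have hR : ResidueOK (RunBlk g.A g.len) e.mem f := hv.residue
  have hrn_lt := hargs.rn_lt
  have hrn64 : rn < 64 := hR.index_lt rn hrn_lt
  -- where `*f` is
  have hob : RunBlk g.A g.len (objBlock f) := hv.obj
  have hobin := hok.inside _ hob
  have hobst := hpre.free.offStack _ hob
  simp only [vblock, voff] at hobin hobst
  -- the residue record `r = residue_config + 32·rn` (R2)
  obtain ⟨rc, hrc⟩ : ∃ rc : Nat, stb_vorbis.residue_config e.mem f = rc := ⟨_, rfl⟩
  obtain ⟨r, hr⟩ : ∃ r : Nat, rc + 32 * rn = r := ⟨_, rfl⟩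
  have hr_at : stb_vorbis.residue_config_at e.mem f rn = r := by
    unfold stb_vorbis.residue_config_at
    rw [hrc]
    simp only [voff]
    exact hr
  have hR1 := hR.R1
  have hR2in := hok.inside _ hR.R2
  have hR2st := hpre.free.offStack _ hR.R2
  rw [hrc] at hR2in hR2st
  simp only [voff] at hR2in hR2st
  have hrin : 0x100000 ≤ r ∧ r + 32 ≤ 0xC00000 := by omega
  have hrst : r + 32 ≤ 0x700000 ∨ 0x800000 ≤ r := by omega
  clear hR2in hR2st
  have hrec : ResidueAtOK (RunBlk g.A g.len) e.mem f r := hr_at ▸ hR.record rn hrn_lt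
  -- the class book `cb = codebooks + 2120·classbook` (CB0, R7)
  obtain ⟨cbk, hcbk⟩ : ∃ x : Nat, Residue.classbook e.mem r = x := ⟨_, rfl⟩
  obtain ⟨cbs, hcbs⟩ : ∃ x : Nat, stb_vorbis.codebooks e.mem f = x := ⟨_, rfl⟩
  obtain ⟨cb, hcb⟩ : ∃ x : Nat, cbs + 2120 * cbk = x := ⟨_, rfl⟩
  have hcb_at : Residue.cbk e.mem f r = cb := by
    unfold Residue.cbk stb_vorbis.codebooks_at
    rw [hcbk, hcbs]
    simp only [voff]
    exact hcb
  have hR7 := hrec.R7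
  rw [hcbk] at hR7
  have hCBin := hok.inside _ hv.config.cb0.F2
  have hCBst := hpre.free.offStack _ hv.config.cb0.F2
  rw [hcbs] at hCBin hCBst
  simp only [voff] at hCBin hCBst
  have hcbin : 0x100000 ≤ cb ∧ cb + 2120 ≤ 0xC00000 := by omega
  have hcbst : cb + 2120 ≤ 0x700000 ∨ 0x800000 ≤ cb := by omega
  have hcbk256 : cbk < 256 := by
    rw [← hcbk]
    simp only [vacc, voff]
    exact Mem.u8_lt _ _
  clear hCBin hCBst
  -- the loads of the walk, named
  have hsext := sext_small (e.reg .r8) rn hrn (by omega)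
  have hraddr : UInt64.ofNat rn <<< 5 + UInt64.ofNat rc = addr r := by
    apply eq_addr
    rw [UInt64.toNat_add, UInt64.toNat_shiftLeft, UInt64.toNat_ofNat', UInt64.toNat_ofNat']
    have e5 : (5 : UInt64).toNat % 64 = 5 := rfl
    rw [e5, Nat.shiftLeft_eq]
    omega
  have F1 : v.mem.readLE (e.reg .rdi + 456) 8 = rc := by
    rw [fact_of_addr hsame he_room he_top (n := f + 456) 8 (eq_addr _ _ (by u_omega)) (by omega) (by omega), ← hrc]
    simp only [vacc, voff]
    rfl
  obtain ⟨rtype, hrtype⟩ : ∃ x : Nat, stb_vorbis.residue_types e.mem f rn = x := ⟨_, rfl⟩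
  have F2 : v.mem.readLE (e.reg .rdi + (UInt64.ofNat rn + 160) * 2 + 4) 2 = rtype := by
    rw [fact_of_addr hsame he_room he_top (n := f + 324 + 2 * rn) 2 (eq_addr _ _ (by u_omega)) (by omega) (by omega), ← hrtype]
    simp only [vacc, voff]
    rfl
  have F3 : v.mem.readLE (addr r + 13) 1 = cbk := by
    rw [fact_of_addr hsame he_room he_top (n := r + 13) 1 (eq_addr _ _ (by u_omega)) (by omega) (by omega), ← hcbk]
    simp only [vacc, voff]
    rfl
  have F4 : v.mem.readLE (e.reg .rdi + 168) 8 = cbs := by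
    rw [fact_of_addr hsame he_room he_top (n := f + 168) 8 (eq_addr _ _ (by u_omega)) (by omega) (by omega), ← hcbs]
    simp only [vacc, voff]
    rfl
  have hcbaddr : Word.ofBV (BitVec.setWidth 64 (BitVec.zeroExtend 32 (BitVec.setWidth 8 (BitVec.zeroExtend 32
      (BitVec.ofNat 8 cbk))))) * 2120 + UInt64.ofNat cbs = addr cb := by
    apply eq_addr
    have e1 : (Word.ofBV (BitVec.setWidth 64 (BitVec.zeroExtend 32 (BitVec.setWidth 8 (BitVec.zeroExtend 32
        (BitVec.ofNat 8 cbk)))))).toNat = cbk := by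
      unfold Word.ofBV
      simp only [UInt64.toNat_ofBitVec, BitVec.toNat_setWidth, BitVec.toNat_ofNat, BitVec.truncate_eq_setWidth]
      omega
    rw [UInt64.toNat_add, UInt64.toNat_mul, e1, UInt64.toNat_ofNat']
    have e2 : (2120 : UInt64).toNat = 2120 := rfl
    rw [e2]
    omega
  -- liveness inside the function: the own frame's objects were added
  have hL' : BlkLive (RunBlk g.A g.len) (Live (stackObjs g.frames' ++ g.others)) := by
    refine BlkLive.mono hpre.env.live ?_
    intro x hx
    obtain ⟨o, ho, hb⟩ := hx
    exact ⟨o, live_sub_frames' g o ho, hb⟩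
  have hl' : LiveIn g.others g.frames' f 1808 := by
    have h := hpre.inv.hand.obj.mono (live_sub_frames' g)
    rw [hf] at h
    simp only [voff] at h
    exact h
  have hstack : Lay.Has (e.reg .rsp - 848) 856 := he_stack
  u_walk hcode [hμ.vendor, hsext, hraddr, hcbaddr] until [Vorbis.L.decode_residue.ret5] span [Vorbis.L.textLo, Vorbis.L.textHi] side (v_side)
  case check_10ecb8 =>
    -- 0x10ecb8: `f->residue_types[rn]` (f + 324 + 2·rn, 2 bytes): inside `*f` (R1: rn < 64)
    have hun : ShadowUntouched v.mem s_10ecb8.mem := by v_untouched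
    exact hl'.accSmall hshadow hun _ 2 (by decide) (by u_omega) (by u_omega)
  case check_10ecce =>
    -- 0x10ecce: `r->classbook` (r + 13, 1 byte): inside the `residue_config` block (R2)
    have hun : ShadowUntouched v.mem s_10ecce.mem := by v_untouched
    have hs := hR.site_record hL' hrn_lt 13 1 (by simp only [voff]; omega) (by omega) rfl
    refine check_site hshadow hun hs ?_
    rw [hr_at, show (13 : Word) = UInt64.ofNat 13 from rfl, addr_add]
    exact toNat_addr _ (by omega)
  case check_10ecdf =>
    -- 0x10ecdf: `f->codebooks` (f + 168, 8 bytes): inside `*f`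
    have hun : ShadowUntouched v.mem s_10ecdf.mem := by v_untouched
    exact hl'.accSmall hshadow hun _ 8 (by decide) (by u_omega) (by u_omega)
  case check_10ecf8 =>
    -- 0x10ecf8: `f->codebooks[classbook].dimensions` (cb + 0, 4 bytes): inside the codebooks block (CB0 + R7)
    have hun : ShadowUntouched v.mem s_10ecf8.mem := by v_untouched
    have hs := hrec.site_cbk hL' hv.config.cb0.F2 0 4 (by simp only [voff]; omega) (by omega) rfl
    refine check_site hshadow hun hs ?_
    rw [hcb_at]
    exact toNat_addr _ (by omega)
  case cont =>
    -- 0x10ecfd: the assertion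
    refine ReachVia.done ?_
    have hgr : g.r = r := by
      unfold G.r
      rw [hge, hgf, hgrn]
      exact hr_at
    have hgrt : g.rtype = rtype := by
      unfold G.rtype
      rw [hge, hgf, hgrn]
      exact hrtype
    rw [hcbaddr] at w_rbx
    have hun : ShadowUntouched v.mem s_10ecf8r.mem := by v_untouched
    refine ⟨w_rip, ?_, ?_, ?_, ?_, ?_, ?_, w_eq, ?abi, ?_, ?_, ?_, ?_, ?_, ?_, ?_, ?_, ?ch, ?n, ?_, ?si, ?rt, ?same, ?shadow⟩
    case abi => v_inv
    case ch =>
      rw [hge]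
      u_frame fr_ch
    case n =>
      rw [hge]
      u_frame sl_n
    case si =>
      rw [hge, hRA]
      u_frame fr_si
    case rt =>
      rw [hge, hgrt]
      u_resolve
      have h3 := hR.R3 rn hrn_lt
      rw [hrtype] at h3
      simp only [BitVec.truncate_eq_setWidth, BitVec.toNat_setWidth, BitVec.toNat_ofNat]
      omega
    case same =>
      rw [hge, hRA]
      u_same
    case shadow =>
      rw [hRA]
      exact hshadow.untouched hun
    all_goals try rw [hge]
    all_goals first
      | (with_reducible assumption)
      | (rw [hgr]; with_reducible assumption)
      | (rw [hgf, hgr, hcb_at]; with_reducible assumption)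
      | (rw [hgrt]; with_reducible assumption)
      | (rw [w_kept .rbp rfl]; with_reducible assumption)
      | (rw [w_kept .r15 rfl]; with_reducible assumption)
      | u_resolve

/-! ### 0x10ecfd – 0x10ed1e: `classwords`, `actual_size` -/

/-- **The frame between `ret5` and `ret8`**: everything `At1c` says except `rip` and `rbx` (the steady rsp / rbp, `r14 = r`, the
saved registers, the spills with `rtype` and `classwords`, the footprint so far, the shadow layer). -/
structure Fr1b (u₀ : State) (g : G) (v : State) : Prop where
  rsp : v.reg .rsp = g.e.reg .rsp - 248
  rbp : v.reg .rbp = g.e.reg .rsp - 8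
  r14 : v.reg .r14 = addr g.r
  code : CodeOK u₀ v.mem
  inv : abiInv v
  s_rbp : UInt64.ofNat (v.mem.readLE (g.e.reg .rsp - 8) 8) = g.e.reg .rbp
  s_r15 : UInt64.ofNat (v.mem.readLE (g.e.reg .rsp - 16) 8) = g.e.reg .r15
  s_r14 : UInt64.ofNat (v.mem.readLE (g.e.reg .rsp - 24) 8) = g.e.reg .r14
  s_r13 : UInt64.ofNat (v.mem.readLE (g.e.reg .rsp - 32) 8) = g.e.reg .r13
  s_r12 : UInt64.ofNat (v.mem.readLE (g.e.reg .rsp - 40) 8) = g.e.reg .r12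
  s_rbx : UInt64.ofNat (v.mem.readLE (g.e.reg .rsp - 48) 8) = g.e.reg .rbx
  fr_f : UInt64.ofNat (v.mem.readLE (g.e.reg .rsp - 184) 8) = g.e.reg .rdi
  fr_rb : UInt64.ofNat (v.mem.readLE (g.e.reg .rsp - 216) 8) = g.e.reg .rsi
  fr_ch : v.mem.readLE (g.e.reg .rsp - 156) 4 = g.ch
  sl_n : v.mem.readLE (g.e.reg .rsp - 208) 4 = g.n
  sl_dnd : UInt64.ofNat (v.mem.readLE (g.e.reg .rsp - 168) 8) = g.e.reg .r9
  fr_si : v.mem.readLE (g.e.reg .rsp - 240) 8 = (g.RA - 152) / 8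
  fr_rtype : v.mem.readLE (g.e.reg .rsp - 232) 4 = g.rtype
  fr_w : v.mem.readLE (g.e.reg .rsp - 200) 4 = g.W
  same : Mem.SameExcept [⟨g.RA - 256, g.RA⟩, shadowSpan (g.RA - 152) (g.RA - 56)] g.e.mem v.mem
  shadow : ShadowInv g.others g.frames' (g.RA - 248) v.mem

/-- **The assertion at 0x10ed1e** (`ret6`: after the check of `r->begin`): the frame, `r13d = actual_size`. -/
structure MidA (u₀ : State) (g : G) (v : State) : Prop where
  rip : v.rip = L.decode_residue.ret6
  r13 : v.reg .r13 = UInt64.ofNat (Res.actualDec g.rtype g.n)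
  fr : Fr1b u₀ g v

/-- **From `ret5` (0x10ecfd) to `ret6` (0x10ed1e)**: `classwords` is spilled, `actual_size = (rtype == 2 ? 2n : n)` on two paths,
the check of `r->begin` (inside the record: R2). -/
theorem actual_walk {Lay : Layout} (hLay : Lay.hi = 0x1000000) {μ : Microarch} (hμ : UserX.MicroOK μ) {u₀ : State}
    (hcode : HasCodeNat Lay u₀ Vorbis.L.decode_residue.entry Vorbis.Code.code_decode_residue.nat Vorbis.L.decode_residue.size)
    (hld4 : Asan.SmallCheck Lay μ Vorbis.WayInv (Vorbis.CodeOK u₀) [.rax, .rcx, .rdx] 4 Vorbis.L.__asan_load4_noabort.entry)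
    (g : G) (hent : Entered u₀ g) (v : State) (hat : AtQ u₀ g v) :
    ReachVia Lay μ WayInv v (fun v' => MidA u₀ g v') := by
  obtain ⟨e, hge⟩ : ∃ e, g.e = e := ⟨_, rfl⟩
  have he := hent.entry
  have hpre := hent.pre
  have hRA : g.RA = (e.reg .rsp).toNat := by
    unfold G.RA
    rw [hge]
  obtain ⟨w_rip, v_rsp, v_rbp, v_r15, v_r14, v_rbx, v_r13, hcodeok, hinvabi, sav_rbp, sav_r15, sav_r14, sav_r13, sav_r12, sav_rbx, fr_f,
    fr_rb, fr_ch, sl_n, sl_dnd, fr_si, fr_rtype, hsame, hshadow⟩ := hat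
  rw [hge] at he hpre v_rsp v_rbp v_r15 sav_rbp sav_r15 sav_r14 sav_r13 sav_r12 sav_rbx fr_f fr_rb fr_ch sl_n sl_dnd fr_si fr_rtype hsame
  rw [hRA] at hsame hshadow fr_si
  v_entry he
  have w_eq : Mem.EqOn Vorbis.L.textLo Vorbis.L.textHi u₀.mem v.mem := hcodeok
  have hdf : v.flags .df = false := (show abiInv _ from hinvabi).1
  have hmx : v.mxcsr &&& 0x1F80 = 0x1F80 := (show abiInv _ from hinvabi).2
  have hsse := Vorbis.sseOK_of_abiInv hinvabi
  -- ghosts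
  obtain ⟨f, hf⟩ : ∃ f : Nat, (e.reg .rdi).toNat = f := ⟨_, rfl⟩
  obtain ⟨rn, hrn⟩ : ∃ rn : Nat, (e.reg .r8).toNat % 2 ^ 32 = rn := ⟨_, rfl⟩
  have hgf : g.f = f := by
    unfold G.f
    rw [hge]
    exact hf
  have hgrn : g.rn = rn := by
    unfold G.rn
    rw [hge]
    exact hrn
  have hv : Real.VorbisOK g.len (RunBlk g.A g.len) e.mem f := hf ▸ hpre.vorbis
  have hok : BlkOK (RunBlk g.A g.len) := hpre.env.ok
  have hargs := hpre.args
  rw [hf, hrn] at hargs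
  have hR : ResidueOK (RunBlk g.A g.len) e.mem f := hv.residue
  have hrn_lt := hargs.rn_lt
  have hrn64 : rn < 64 := hR.index_lt rn hrn_lt
  -- where `*f` is
  have hob : RunBlk g.A g.len (objBlock f) := hv.obj
  have hobin := hok.inside _ hob
  have hobst := hpre.free.offStack _ hob
  simp only [vblock, voff] at hobin hobst
  -- the residue record `r = residue_config + 32·rn` (R2)
  obtain ⟨rc, hrc⟩ : ∃ rc : Nat, stb_vorbis.residue_config e.mem f = rc := ⟨_, rfl⟩
  obtain ⟨r, hr⟩ : ∃ r : Nat, rc + 32 * rn = r := ⟨_, rfl⟩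
  have hr_at : stb_vorbis.residue_config_at e.mem f rn = r := by
    unfold stb_vorbis.residue_config_at
    rw [hrc]
    simp only [voff]
    exact hr
  have hR1 := hR.R1
  have hR2in := hok.inside _ hR.R2
  have hR2st := hpre.free.offStack _ hR.R2
  rw [hrc] at hR2in hR2st
  simp only [voff] at hR2in hR2st
  have hrin : 0x100000 ≤ r ∧ r + 32 ≤ 0xC00000 := by omega
  have hrst : r + 32 ≤ 0x700000 ∨ 0x800000 ≤ r := by omega
  clear hR2in hR2st
  have hrec : ResidueAtOK (RunBlk g.A g.len) e.mem f r := hr_at ▸ hR.record rn hrn_lt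
  -- the class book `cb = codebooks + 2120·classbook` (CB0, R7)
  obtain ⟨cbk, hcbk⟩ : ∃ x : Nat, Residue.classbook e.mem r = x := ⟨_, rfl⟩
  obtain ⟨cbs, hcbs⟩ : ∃ x : Nat, stb_vorbis.codebooks e.mem f = x := ⟨_, rfl⟩
  obtain ⟨cb, hcb⟩ : ∃ x : Nat, cbs + 2120 * cbk = x := ⟨_, rfl⟩
  have hcb_at : Residue.cbk e.mem f r = cb := by
    unfold Residue.cbk stb_vorbis.codebooks_at
    rw [hcbk, hcbs]
    simp only [voff]
    exact hcb
  have hR7 := hrec.R7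
  rw [hcbk] at hR7
  have hCBin := hok.inside _ hv.config.cb0.F2
  have hCBst := hpre.free.offStack _ hv.config.cb0.F2
  rw [hcbs] at hCBin hCBst
  simp only [voff] at hCBin hCBst
  have hcbin : 0x100000 ≤ cb ∧ cb + 2120 ≤ 0xC00000 := by omega
  have hcbst : cb + 2120 ≤ 0x700000 ∨ 0x800000 ≤ cb := by omega
  have hcbk256 : cbk < 256 := by
    rw [← hcbk]
    simp only [vacc, voff]
    exact Mem.u8_lt _ _
  clear hCBin hCBst
  -- liveness inside the function: the own frame's objects were added
  have hL' : BlkLive (RunBlk g.A g.len) (Live (stackObjs g.frames' ++ g.others)) := by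
    refine BlkLive.mono hpre.env.live ?_
    intro x hx
    obtain ⟨o, ho, hb⟩ := hx
    exact ⟨o, live_sub_frames' g o ho, hb⟩
  have hl' : LiveIn g.others g.frames' f 1808 := by
    have h := hpre.inv.hand.obj.mono (live_sub_frames' g)
    rw [hf] at h
    simp only [voff] at h
    exact h
  have hstack : Lay.Has (e.reg .rsp - 848) 856 := he_stack
  have hgr : g.r = r := by
    unfold G.r
    rw [hge, hgf, hgrn]
    exact hr_at
  obtain ⟨rtype, hrtype⟩ : ∃ x : Nat, stb_vorbis.residue_types e.mem f rn = x := ⟨_, rfl⟩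
  have hgrt : g.rtype = rtype := by
    unfold G.rtype
    rw [hge, hgf, hgrn]
    exact hrtype
  obtain ⟨n, hn⟩ : ∃ x : Nat, (e.reg .rcx).toNat % 2 ^ 32 = x := ⟨_, rfl⟩
  have hgn : g.n = n := by
    unfold G.n
    rw [hge]
    exact hn
  rw [hgr] at v_r14
  rw [hgf, hgr, hge, hcb_at] at v_rbx
  rw [hgrt] at v_r13 fr_rtype
  rw [hgn] at sl_n
  have h3 := hR.R3 rn hrn_lt
  rw [hrtype] at h3
  -- `classwords`, read as an unsigned word, is the number `W` (R7b: it is positive)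
  obtain ⟨W, hW⟩ : ∃ x : Nat, Residue.W e.mem f r = x := ⟨_, rfl⟩
  have eW : Residue.W e.mem f r = (e.mem.i32 cb).toNat := by
    unfold Residue.W
    rw [hcb_at]
    simp only [vacc, voff]
    rfl
  have hW1 : 1 ≤ W := by
    rw [← hW]
    exact hrec.R7b
  have FW : v.mem.readLE (addr cb) 4 = W := by
    rw [fact_of_addr hsame he_room he_top (n := cb) 4 rfl (by omega) (by omega), ← hW, eW]
    have hc := e.mem.i32_cases cb
    rw [← hW, eW] at hW1
    show e.mem.u32 cb = _
    omega
  have hW31 : W < 2 ^ 31 := by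
    have h := e.mem.i32_range cb
    rw [← hW, eW]
    omega
  have hgW : g.W = W := by
    unfold G.W
    rw [hge, hgf, hgr]
    exact hW
  have hn4096 : n ≤ 4096 := by
    have h1 := hargs.n_le
    have h2 := hv.header.HD3.range
    have h4 := hv.header.HD3.b1_eq
    rw [hn] at h1
    omega
  have hrtbv : (BitVec.zeroExtend 32 (BitVec.ofNat 16 rtype)).toNat = rtype := by
    simp only [BitVec.truncate_eq_setWidth, BitVec.toNat_setWidth, BitVec.toNat_ofNat]
    omega
  u_walk hcode [hμ.vendor] until [Vorbis.L.decode_residue.ret6] span [Vorbis.L.textLo, Vorbis.L.textHi] side (first | v_side | (simp only [addr]; v_side))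
  · -- 0x10ed19: `r->begin` (r + 0, 4 bytes): inside the `residue_config` block (R2)
    have hun : ShadowUntouched v.mem s_10ed19.mem := by v_untouched
    have hs := hR.site_record hL' hrn_lt 0 4 (by simp only [voff]; omega) (by omega) rfl
    refine check_site hshadow hun hs ?_
    rw [hr_at]
    exact toNat_addr _ (by omega)
  · -- 0x10ed19: `r->begin` (r + 0, 4 bytes): inside the `residue_config` block (R2)
    have hun : ShadowUntouched v.mem s_10ed19.mem := by v_untouched
    have hs := hR.site_record hL' hrn_lt 0 4 (by simp only [voff]; omega) (by omega) rfl
    refine check_site hshadow hun hs ?_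
    rw [hr_at]
    exact toNat_addr _ (by omega)
  · -- 0x10ed1e: the assertion (`rtype = 2`: `actual_size = 2·n`)
    refine ReachVia.done ?_
    have hun : ShadowUntouched v.mem s_10ed19r.mem := by v_untouched
    refine ⟨w_rip, ?r13, ⟨?_, ?_, ?_, w_eq, ?abi, ?_, ?_, ?_, ?_, ?_, ?_, ?_, ?_, ?ch, ?n, ?_, ?si, ?rt, ?w, ?same, ?shadow⟩⟩
    case r13 =>
      rw [w_r13, hgrt, hgn, Res.actualDec_def]
      rw [hrtbv] at hbr_10ed09
      rw [if_pos hbr_10ed09]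
      apply UInt64.toNat_inj.mp
      rw [toNat_ofBV32, toNat_double32 n (by omega), UInt64.toNat_ofNat']
      omega
    case abi => v_inv
    case ch =>
      rw [hge]
      u_frame fr_ch
    case n =>
      rw [hge, hgn]
      u_frame sl_n
    case si =>
      rw [hge, hRA]
      u_frame fr_si
    case rt =>
      rw [hge, hgrt]
      u_frame fr_rtype
    case w =>
      rw [hge, hgW]
      u_resolve
      simp only [BitVec.toNat_ofNat]
      omega
    case same =>
      rw [hge, hRA]
      u_same
    case shadow =>
      rw [hRA]
      exact hshadow.untouched hun
    all_goals try rw [hge]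
    all_goals first
      | (with_reducible assumption)
      | (rw [w_kept .rbp rfl]; with_reducible assumption)
      | (rw [w_kept .r14 rfl, hgr]; with_reducible assumption)
      | u_resolve
  · -- 0x10ed1e: the assertion (`rtype ≠ 2`: `actual_size = n`)
    refine ReachVia.done ?_
    have hun : ShadowUntouched v.mem s_10ed19r.mem := by v_untouched
    refine ⟨w_rip, ?r13, ⟨?_, ?_, ?_, w_eq, ?abi, ?_, ?_, ?_, ?_, ?_, ?_, ?_, ?_, ?ch, ?n, ?_, ?si, ?rt, ?w, ?same, ?shadow⟩⟩
    case r13 =>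
      rw [w_r13, hgrt, hgn, Res.actualDec_def]
      rw [hrtbv] at hbr_10ed09
      rw [if_neg hbr_10ed09]
      apply UInt64.toNat_inj.mp
      rw [toNat_ofBV32, BitVec.toNat_ofNat, UInt64.toNat_ofNat']
      omega
    case abi => v_inv
    case ch =>
      rw [hge]
      u_frame fr_ch
    case n =>
      rw [hge, hgn]
      u_frame sl_n
    case si =>
      rw [hge, hRA]
      u_frame fr_si
    case rt =>
      rw [hge, hgrt]
      u_frame fr_rtype
    case w =>
      rw [hge, hgW]
      u_resolve
      simp only [BitVec.toNat_ofNat]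
      omega
    case same =>
      rw [hge, hRA]
      u_same
    case shadow =>
      rw [hRA]
      exact hshadow.untouched hun
    all_goals try rw [hge]
    all_goals first
      | (with_reducible assumption)
      | (rw [w_kept .rbp rfl]; with_reducible assumption)
      | (rw [w_kept .r14 rfl, hgr]; with_reducible assumption)
      | u_resolve

/-! ### 0x10ed1e – 0x10ed31: `limit_r_begin` -/

/-- **The assertion at 0x10ed31** (`ret7`: after the check of `r->end`): the frame, `r13d = actual_size`,
`r12d = limit_r_begin = min(begin, actual_size)`. -/
structure MidB (u₀ : State) (g : G) (v : State) : Prop where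
  rip : v.rip = L.decode_residue.ret7
  r13 : v.reg .r13 = UInt64.ofNat (Res.actualDec g.rtype g.n)
  r12 : v.reg .r12 = UInt64.ofNat (min (Residue.begin g.e.mem g.r) (Res.actualDec g.rtype g.n))
  fr : Fr1b u₀ g v

/-- **From `ret6` (0x10ed1e) to `ret7` (0x10ed31)**: `limit_r_begin = min(r->begin, actual_size)` (`cmova`: two paths), the check of
`r->end` (inside the record: R2). -/
theorem begin_walk {Lay : Layout} (hLay : Lay.hi = 0x1000000) {μ : Microarch} (hμ : UserX.MicroOK μ) {u₀ : State}
    (hcode : HasCodeNat Lay u₀ Vorbis.L.decode_residue.entry Vorbis.Code.code_decode_residue.nat Vorbis.L.decode_residue.size)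
    (hld4 : Asan.SmallCheck Lay μ Vorbis.WayInv (Vorbis.CodeOK u₀) [.rax, .rcx, .rdx] 4 Vorbis.L.__asan_load4_noabort.entry)
    (g : G) (hent : Entered u₀ g) (v : State) (hat : MidA u₀ g v) :
    ReachVia Lay μ WayInv v (fun v' => MidB u₀ g v') := by
  obtain ⟨e, hge⟩ : ∃ e, g.e = e := ⟨_, rfl⟩
  have he := hent.entry
  have hpre := hent.pre
  have hRA : g.RA = (e.reg .rsp).toNat := by
    unfold G.RA
    rw [hge]
  obtain ⟨w_rip, v_r13, ⟨v_rsp, v_rbp, v_r14, hcodeok, hinvabi, sav_rbp, sav_r15, sav_r14, sav_r13, sav_r12, sav_rbx, fr_f,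
    fr_rb, fr_ch, sl_n, sl_dnd, fr_si, fr_rtype, fr_w, hsame, hshadow⟩⟩ := hat
  rw [hge] at he hpre v_rsp v_rbp sav_rbp sav_r15 sav_r14 sav_r13 sav_r12 sav_rbx fr_f fr_rb fr_ch sl_n sl_dnd fr_si fr_rtype fr_w hsame
  rw [hRA] at hsame hshadow fr_si
  v_entry he
  have w_eq : Mem.EqOn Vorbis.L.textLo Vorbis.L.textHi u₀.mem v.mem := hcodeok
  have hdf : v.flags .df = false := (show abiInv _ from hinvabi).1
  have hmx : v.mxcsr &&& 0x1F80 = 0x1F80 := (show abiInv _ from hinvabi).2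
  have hsse := Vorbis.sseOK_of_abiInv hinvabi
  -- ghosts
  obtain ⟨f, hf⟩ : ∃ f : Nat, (e.reg .rdi).toNat = f := ⟨_, rfl⟩
  obtain ⟨rn, hrn⟩ : ∃ rn : Nat, (e.reg .r8).toNat % 2 ^ 32 = rn := ⟨_, rfl⟩
  have hgf : g.f = f := by
    unfold G.f
    rw [hge]
    exact hf
  have hgrn : g.rn = rn := by
    unfold G.rn
    rw [hge]
    exact hrn
  have hv : Real.VorbisOK g.len (RunBlk g.A g.len) e.mem f := hf ▸ hpre.vorbis
  have hok : BlkOK (RunBlk g.A g.len) := hpre.env.ok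
  have hargs := hpre.args
  rw [hf, hrn] at hargs
  have hR : ResidueOK (RunBlk g.A g.len) e.mem f := hv.residue
  have hrn_lt := hargs.rn_lt
  have hrn64 : rn < 64 := hR.index_lt rn hrn_lt
  -- where `*f` is
  have hob : RunBlk g.A g.len (objBlock f) := hv.obj
  have hobin := hok.inside _ hob
  have hobst := hpre.free.offStack _ hob
  simp only [vblock, voff] at hobin hobst
  -- the residue record `r = residue_config + 32·rn` (R2)
  obtain ⟨rc, hrc⟩ : ∃ rc : Nat, stb_vorbis.residue_config e.mem f = rc := ⟨_, rfl⟩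
  obtain ⟨r, hr⟩ : ∃ r : Nat, rc + 32 * rn = r := ⟨_, rfl⟩
  have hr_at : stb_vorbis.residue_config_at e.mem f rn = r := by
    unfold stb_vorbis.residue_config_at
    rw [hrc]
    simp only [voff]
    exact hr
  have hR1 := hR.R1
  have hR2in := hok.inside _ hR.R2
  have hR2st := hpre.free.offStack _ hR.R2
  rw [hrc] at hR2in hR2st
  simp only [voff] at hR2in hR2st
  have hrin : 0x100000 ≤ r ∧ r + 32 ≤ 0xC00000 := by omega
  have hrst : r + 32 ≤ 0x700000 ∨ 0x800000 ≤ r := by omega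
  clear hR2in hR2st
  have hrec : ResidueAtOK (RunBlk g.A g.len) e.mem f r := hr_at ▸ hR.record rn hrn_lt
  -- the class book `cb = codebooks + 2120·classbook` (CB0, R7)
  obtain ⟨cbk, hcbk⟩ : ∃ x : Nat, Residue.classbook e.mem r = x := ⟨_, rfl⟩
  obtain ⟨cbs, hcbs⟩ : ∃ x : Nat, stb_vorbis.codebooks e.mem f = x := ⟨_, rfl⟩
  obtain ⟨cb, hcb⟩ : ∃ x : Nat, cbs + 2120 * cbk = x := ⟨_, rfl⟩
  have hcb_at : Residue.cbk e.mem f r = cb := by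
    unfold Residue.cbk stb_vorbis.codebooks_at
    rw [hcbk, hcbs]
    simp only [voff]
    exact hcb
  have hR7 := hrec.R7
  rw [hcbk] at hR7
  have hCBin := hok.inside _ hv.config.cb0.F2
  have hCBst := hpre.free.offStack _ hv.config.cb0.F2
  rw [hcbs] at hCBin hCBst
  simp only [voff] at hCBin hCBst
  have hcbin : 0x100000 ≤ cb ∧ cb + 2120 ≤ 0xC00000 := by omega
  have hcbst : cb + 2120 ≤ 0x700000 ∨ 0x800000 ≤ cb := by omega
  have hcbk256 : cbk < 256 := by
    rw [← hcbk]
    simp only [vacc, voff]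
    exact Mem.u8_lt _ _
  clear hCBin hCBst
  -- liveness inside the function: the own frame's objects were added
  have hL' : BlkLive (RunBlk g.A g.len) (Live (stackObjs g.frames' ++ g.others)) := by
    refine BlkLive.mono hpre.env.live ?_
    intro x hx
    obtain ⟨o, ho, hb⟩ := hx
    exact ⟨o, live_sub_frames' g o ho, hb⟩
  have hl' : LiveIn g.others g.frames' f 1808 := by
    have h := hpre.inv.hand.obj.mono (live_sub_frames' g)
    rw [hf] at h
    simp only [voff] at h
    exact h
  have hstack : Lay.Has (e.reg .rsp - 848) 856 := he_stack
  have hgr : g.r = r := by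
    unfold G.r
    rw [hge, hgf, hgrn]
    exact hr_at
  rw [hgr] at v_r14
  -- `actual_size` as a number `A ≤ 2·n ≤ 8192`
  obtain ⟨A, hA⟩ : ∃ x : Nat, Res.actualDec g.rtype g.n = x := ⟨_, rfl⟩
  have hA8192 : A ≤ 8192 := by
    have h0 := Res.actualDec_le g.rtype g.n
    have h1 := hargs.n_le
    have h2 := hv.header.HD3.range
    have h4 := hv.header.HD3.b1_eq
    have hgn : g.n = (e.reg .rcx).toNat % 2 ^ 32 := by
      unfold G.n
      rw [hge]
    rw [hA] at h0
    rw [hgn] at h0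
    omega
  rw [hA] at v_r13
  -- `r->begin` and `r->end`
  obtain ⟨b, hb⟩ : ∃ x : Nat, Residue.begin e.mem r = x := ⟨_, rfl⟩
  obtain ⟨en, hen⟩ : ∃ x : Nat, Residue.end_ e.mem r = x := ⟨_, rfl⟩
  have h4 := hrec.R4
  rw [hb, hen] at h4
  have F5 : v.mem.readLE (addr r) 4 = b := by
    rw [fact_of_addr hsame he_room he_top (n := r) 4 rfl (by omega) (by omega), ← hb]
    simp only [vacc, voff]
    rfl
  have hb32 : b < 2 ^ 32 := by omega
  have hpart : (Word.part Width.w32 (UInt64.ofNat A)).toNat = A := by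
    rw [toNat_part32, UInt64.toNat_ofNat']
    omega
  have e32 : (2 : Nat) ^ Width.w32.bits = 4294967296 := rfl
  u_walk hcode [hμ.vendor] until [Vorbis.L.decode_residue.ret7] span [Vorbis.L.textLo, Vorbis.L.textHi] side (first | v_side | (simp only [addr]; v_side))
  · -- 0x10ed2c: `r->end` (r + 4, 4 bytes): inside the `residue_config` block (R2)
    have hun : ShadowUntouched v.mem s_10ed2c.mem := by v_untouched
    have hs := hR.site_record hL' hrn_lt 4 4 (by simp only [voff]; omega) (by omega) rfl
    refine check_site hshadow hun hs ?_
    rw [hr_at, show (4 : Word) = UInt64.ofNat 4 from rfl, addr_add]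
    exact toNat_addr _ (by omega)
  · -- 0x10ed2c: `r->end` (r + 4, 4 bytes): inside the `residue_config` block (R2)
    have hun : ShadowUntouched v.mem s_10ed2c.mem := by v_untouched
    have hs := hR.site_record hL' hrn_lt 4 4 (by simp only [voff]; omega) (by omega) rfl
    refine check_site hshadow hun hs ?_
    rw [hr_at, show (4 : Word) = UInt64.ofNat 4 from rfl, addr_add]
    exact toNat_addr _ (by omega)
  · -- 0x10ed31: the assertion (`begin > actual_size`: the `cmova` replaces)
    refine ReachVia.done ?_
    have hun : ShadowUntouched v.mem s_10ed2cr.mem := by v_untouched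
    rw [hpart, e32] at hbr_10ed24
    refine ⟨w_rip, ?r13, ?r12, ⟨?_, ?_, ?_, w_eq, ?abi, ?_, ?_, ?_, ?_, ?_, ?_, ?_, ?_, ?ch, ?n, ?_, ?si, ?rt, ?w, ?same, ?shadow⟩⟩
    case r13 =>
      rw [w_kept .r13 rfl, hA]
      exact v_r13
    case r12 =>
      rw [w_r12, hge, hgr, hb, hA]
      apply UInt64.toNat_inj.mp
      rw [toNat_ofBV32, hpart, UInt64.toNat_ofNat']
      omega
    case abi => v_inv
    case ch =>
      rw [hge]
      u_frame fr_ch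
    case n =>
      rw [hge]
      u_frame sl_n
    case si =>
      rw [hge, hRA]
      u_frame fr_si
    case rt =>
      rw [hge]
      u_frame fr_rtype
    case w =>
      rw [hge]
      u_frame fr_w
    case same =>
      rw [hge, hRA]
      u_same
    case shadow =>
      rw [hRA]
      exact hshadow.untouched hun
    all_goals try rw [hge]
    all_goals first
      | (with_reducible assumption)
      | (rw [w_kept .rbp rfl]; with_reducible assumption)
      | (rw [w_kept .r14 rfl, hgr]; with_reducible assumption)
      | u_resolve
  · -- 0x10ed31: the assertion (`begin ≤ actual_size`)
    refine ReachVia.done ?_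
    have hun : ShadowUntouched v.mem s_10ed2cr.mem := by v_untouched
    rw [hpart, e32] at hbr_10ed24
    refine ⟨w_rip, ?r13, ?r12, ⟨?_, ?_, ?_, w_eq, ?abi, ?_, ?_, ?_, ?_, ?_, ?_, ?_, ?_, ?ch, ?n, ?_, ?si, ?rt, ?w, ?same, ?shadow⟩⟩
    case r13 =>
      rw [w_kept .r13 rfl, hA]
      exact v_r13
    case r12 =>
      rw [w_r12, hge, hgr, hb, hA]
      apply UInt64.toNat_inj.mp
      rw [toNat_ofBV32, BitVec.toNat_ofNat, UInt64.toNat_ofNat']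
      omega
    case abi => v_inv
    case ch =>
      rw [hge]
      u_frame fr_ch
    case n =>
      rw [hge]
      u_frame sl_n
    case si =>
      rw [hge, hRA]
      u_frame fr_si
    case rt =>
      rw [hge]
      u_frame fr_rtype
    case w =>
      rw [hge]
      u_frame fr_w
    case same =>
      rw [hge, hRA]
      u_same
    case shadow =>
      rw [hRA]
      exact hshadow.untouched hun
    all_goals try rw [hge]
    all_goals first
      | (with_reducible assumption)
      | (rw [w_kept .rbp rfl]; with_reducible assumption)
      | (rw [w_kept .r14 rfl, hgr]; with_reducible assumption)
      | u_resolve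

/-! ### 0x10ed31 – 0x10ed48: `limit_r_end`, `n_read` -/

/-- **From `ret7` (0x10ed31) to `ret8` (0x10ed48)**: `limit_r_end = min(r->end, actual_size)` (`cmova`: two paths),
`n_read = limit_r_end − limit_r_begin` (no wrap: R4), the check of `r->part_size` (inside the record: R2). The exit is the tree's
`At1c`: the six paths of the segment have merged. -/
theorem end_walk {Lay : Layout} (hLay : Lay.hi = 0x1000000) {μ : Microarch} (hμ : UserX.MicroOK μ) {u₀ : State}
    (hcode : HasCodeNat Lay u₀ Vorbis.L.decode_residue.entry Vorbis.Code.code_decode_residue.nat Vorbis.L.decode_residue.size)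
    (hld4 : Asan.SmallCheck Lay μ Vorbis.WayInv (Vorbis.CodeOK u₀) [.rax, .rcx, .rdx] 4 Vorbis.L.__asan_load4_noabort.entry)
    (g : G) (hent : Entered u₀ g) (v : State) (hat : MidB u₀ g v) :
    ReachVia Lay μ WayInv v (fun v' => At1c u₀ g v') := by
  obtain ⟨e, hge⟩ : ∃ e, g.e = e := ⟨_, rfl⟩
  have he := hent.entry
  have hpre := hent.pre
  have hRA : g.RA = (e.reg .rsp).toNat := by
    unfold G.RA
    rw [hge]
  obtain ⟨w_rip, v_r13, v_r12, ⟨v_rsp, v_rbp, v_r14, hcodeok, hinvabi, sav_rbp, sav_r15, sav_r14, sav_r13, sav_r12, sav_rbx, fr_f,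
    fr_rb, fr_ch, sl_n, sl_dnd, fr_si, fr_rtype, fr_w, hsame, hshadow⟩⟩ := hat
  rw [hge] at he hpre v_rsp v_rbp sav_rbp sav_r15 sav_r14 sav_r13 sav_r12 sav_rbx fr_f fr_rb fr_ch sl_n sl_dnd fr_si fr_rtype fr_w hsame
  rw [hRA] at hsame hshadow fr_si
  v_entry he
  have w_eq : Mem.EqOn Vorbis.L.textLo Vorbis.L.textHi u₀.mem v.mem := hcodeok
  have hdf : v.flags .df = false := (show abiInv _ from hinvabi).1
  have hmx : v.mxcsr &&& 0x1F80 = 0x1F80 := (show abiInv _ from hinvabi).2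
  have hsse := Vorbis.sseOK_of_abiInv hinvabi
  -- ghosts
  obtain ⟨f, hf⟩ : ∃ f : Nat, (e.reg .rdi).toNat = f := ⟨_, rfl⟩
  obtain ⟨rn, hrn⟩ : ∃ rn : Nat, (e.reg .r8).toNat % 2 ^ 32 = rn := ⟨_, rfl⟩
  have hgf : g.f = f := by
    unfold G.f
    rw [hge]
    exact hf
  have hgrn : g.rn = rn := by
    unfold G.rn
    rw [hge]
    exact hrn
  have hv : Real.VorbisOK g.len (RunBlk g.A g.len) e.mem f := hf ▸ hpre.vorbis
  have hok : BlkOK (RunBlk g.A g.len) := hpre.env.ok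
  have hargs := hpre.args
  rw [hf, hrn] at hargs
  have hR : ResidueOK (RunBlk g.A g.len) e.mem f := hv.residue
  have hrn_lt := hargs.rn_lt
  have hrn64 : rn < 64 := hR.index_lt rn hrn_lt
  -- where `*f` is
  have hob : RunBlk g.A g.len (objBlock f) := hv.obj
  have hobin := hok.inside _ hob
  have hobst := hpre.free.offStack _ hob
  simp only [vblock, voff] at hobin hobst
  -- the residue record `r = residue_config + 32·rn` (R2)
  obtain ⟨rc, hrc⟩ : ∃ rc : Nat, stb_vorbis.residue_config e.mem f = rc := ⟨_, rfl⟩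
  obtain ⟨r, hr⟩ : ∃ r : Nat, rc + 32 * rn = r := ⟨_, rfl⟩
  have hr_at : stb_vorbis.residue_config_at e.mem f rn = r := by
    unfold stb_vorbis.residue_config_at
    rw [hrc]
    simp only [voff]
    exact hr
  have hR1 := hR.R1
  have hR2in := hok.inside _ hR.R2
  have hR2st := hpre.free.offStack _ hR.R2
  rw [hrc] at hR2in hR2st
  simp only [voff] at hR2in hR2st
  have hrin : 0x100000 ≤ r ∧ r + 32 ≤ 0xC00000 := by omega
  have hrst : r + 32 ≤ 0x700000 ∨ 0x800000 ≤ r := by omega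
  clear hR2in hR2st
  have hrec : ResidueAtOK (RunBlk g.A g.len) e.mem f r := hr_at ▸ hR.record rn hrn_lt
  -- the class book `cb = codebooks + 2120·classbook` (CB0, R7)
  obtain ⟨cbk, hcbk⟩ : ∃ x : Nat, Residue.classbook e.mem r = x := ⟨_, rfl⟩
  obtain ⟨cbs, hcbs⟩ : ∃ x : Nat, stb_vorbis.codebooks e.mem f = x := ⟨_, rfl⟩
  obtain ⟨cb, hcb⟩ : ∃ x : Nat, cbs + 2120 * cbk = x := ⟨_, rfl⟩
  have hcb_at : Residue.cbk e.mem f r = cb := by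
    unfold Residue.cbk stb_vorbis.codebooks_at
    rw [hcbk, hcbs]
    simp only [voff]
    exact hcb
  have hR7 := hrec.R7
  rw [hcbk] at hR7
  have hCBin := hok.inside _ hv.config.cb0.F2
  have hCBst := hpre.free.offStack _ hv.config.cb0.F2
  rw [hcbs] at hCBin hCBst
  simp only [voff] at hCBin hCBst
  have hcbin : 0x100000 ≤ cb ∧ cb + 2120 ≤ 0xC00000 := by omega
  have hcbst : cb + 2120 ≤ 0x700000 ∨ 0x800000 ≤ cb := by omega
  have hcbk256 : cbk < 256 := by
    rw [← hcbk]
    simp only [vacc, voff]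
    exact Mem.u8_lt _ _
  clear hCBin hCBst
  -- liveness inside the function: the own frame's objects were added
  have hL' : BlkLive (RunBlk g.A g.len) (Live (stackObjs g.frames' ++ g.others)) := by
    refine BlkLive.mono hpre.env.live ?_
    intro x hx
    obtain ⟨o, ho, hb⟩ := hx
    exact ⟨o, live_sub_frames' g o ho, hb⟩
  have hl' : LiveIn g.others g.frames' f 1808 := by
    have h := hpre.inv.hand.obj.mono (live_sub_frames' g)
    rw [hf] at h
    simp only [voff] at h
    exact h
  have hstack : Lay.Has (e.reg .rsp - 848) 856 := he_stack
  have hgr : g.r = r := by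
    unfold G.r
    rw [hge, hgf, hgrn]
    exact hr_at
  rw [hgr] at v_r14
  -- `actual_size` as a number `A ≤ 2·n ≤ 8192`
  obtain ⟨A, hA⟩ : ∃ x : Nat, Res.actualDec g.rtype g.n = x := ⟨_, rfl⟩
  have hA8192 : A ≤ 8192 := by
    have h0 := Res.actualDec_le g.rtype g.n
    have h1 := hargs.n_le
    have h2 := hv.header.HD3.range
    have h4 := hv.header.HD3.b1_eq
    have hgn : g.n = (e.reg .rcx).toNat % 2 ^ 32 := by
      unfold G.n
      rw [hge]
    rw [hA] at h0
    rw [hgn] at h0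
    omega
  rw [hA] at v_r13 v_r12
  -- `r->begin` and `r->end`
  obtain ⟨b, hb⟩ : ∃ x : Nat, Residue.begin e.mem r = x := ⟨_, rfl⟩
  obtain ⟨en, hen⟩ : ∃ x : Nat, Residue.end_ e.mem r = x := ⟨_, rfl⟩
  have h4 := hrec.R4
  rw [hb, hen] at h4
  rw [hge, hgr, hb] at v_r12
  obtain ⟨lb, hlb⟩ : ∃ x : Nat, min b A = x := ⟨_, rfl⟩
  rw [hlb] at v_r12
  have F6 : v.mem.readLE (addr r + 4) 4 = en := by
    rw [fact_of_addr hsame he_room he_top (n := r + 4) 4 (by rw [show (4 : Word) = UInt64.ofNat 4 from rfl, addr_add]) (by omega) (by omega), ← hen]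
    simp only [vacc, voff]
    rfl
  have hpart : (Word.part Width.w32 (UInt64.ofNat A)).toNat = A := by
    rw [toNat_part32, UInt64.toNat_ofNat']
    omega
  have hpartl : (Word.part Width.w32 (UInt64.ofNat lb)).toNat = lb := by
    rw [toNat_part32, UInt64.toNat_ofNat']
    omega
  have e32 : (2 : Nat) ^ Width.w32.bits = 4294967296 := rfl
  u_walk hcode [hμ.vendor] until [Vorbis.L.decode_residue.ret8] span [Vorbis.L.textLo, Vorbis.L.textHi] side (first | v_side | (simp only [addr]; v_side))
  · -- 0x10ed43: `r->part_size` (r + 8, 4 bytes): inside the `residue_config` block (R2)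
    have hun : ShadowUntouched v.mem s_10ed43.mem := by v_untouched
    have hs := hR.site_record hL' hrn_lt 8 4 (by simp only [voff]; omega) (by omega) rfl
    refine check_site hshadow hun hs ?_
    rw [hr_at, show (8 : Word) = UInt64.ofNat 8 from rfl, addr_add]
    exact toNat_addr _ (by omega)
  · -- 0x10ed43: `r->part_size` (r + 8, 4 bytes): inside the `residue_config` block (R2)
    have hun : ShadowUntouched v.mem s_10ed43.mem := by v_untouched
    have hs := hR.site_record hL' hrn_lt 8 4 (by simp only [voff]; omega) (by omega) rfl
    refine check_site hshadow hun hs ?_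
    rw [hr_at, show (8 : Word) = UInt64.ofNat 8 from rfl, addr_add]
    exact toNat_addr _ (by omega)
  · -- 0x10ed48: the assertion (`end > actual_size`: the `cmova` replaces)
    refine ReachVia.done ?_
    have hun : ShadowUntouched v.mem s_10ed43r.mem := by v_untouched
    rw [hpart, e32] at hbr_10ed38
    refine ⟨w_rip, ?_, ?_, ?r14, ?rbx, w_eq, ?abi, ?_, ?_, ?_, ?_, ?_, ?_, ?_, ?_, ?ch, ?n, ?_, ?si, ?rt, ?w, ?same, ?shadow⟩
    case r14 =>
      rw [w_kept .r14 rfl, hgr]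
      exact v_r14
    case rbx =>
      rw [w_rbx, hge, hgr, hen, hb, hA, hlb]
      apply UInt64.toNat_inj.mp
      rw [toNat_ofBV32, BitVec.toNat_sub, hpart, hpartl, UInt64.toNat_ofNat']
      omega
    case abi => v_inv
    case ch =>
      rw [hge]
      u_frame fr_ch
    case n =>
      rw [hge]
      u_frame sl_n
    case si =>
      rw [hge, hRA]
      u_frame fr_si
    case rt =>
      rw [hge]
      u_frame fr_rtype
    case w =>
      rw [hge]
      u_frame fr_w
    case same =>
      rw [hge, hRA]
      u_same
    case shadow =>
      rw [hRA]
      exact hshadow.untouched hun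
    all_goals try rw [hge]
    all_goals first
      | (with_reducible assumption)
      | (rw [w_kept .rbp rfl]; with_reducible assumption)
      | u_resolve
  · -- 0x10ed48: the assertion (`end ≤ actual_size`)
    refine ReachVia.done ?_
    have hun : ShadowUntouched v.mem s_10ed43r.mem := by v_untouched
    rw [hpart, e32] at hbr_10ed38
    refine ⟨w_rip, ?_, ?_, ?r14, ?rbx, w_eq, ?abi, ?_, ?_, ?_, ?_, ?_, ?_, ?_, ?_, ?ch, ?n, ?_, ?si, ?rt, ?w, ?same, ?shadow⟩
    case r14 =>
      rw [w_kept .r14 rfl, hgr]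
      exact v_r14
    case rbx =>
      rw [w_rbx, hge, hgr, hen, hb, hA, hlb]
      apply UInt64.toNat_inj.mp
      rw [toNat_ofBV32, BitVec.toNat_sub, BitVec.toNat_ofNat, hpartl, UInt64.toNat_ofNat']
      omega
    case abi => v_inv
    case ch =>
      rw [hge]
      u_frame fr_ch
    case n =>
      rw [hge]
      u_frame sl_n
    case si =>
      rw [hge, hRA]
      u_frame fr_si
    case rt =>
      rw [hge]
      u_frame fr_rtype
    case w =>
      rw [hge]
      u_frame fr_w
    case same =>
      rw [hge, hRA]
      u_same
    case shadow =>
      rw [hRA]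
      exact hshadow.untouched hun
    all_goals try rw [hge]
    all_goals first
      | (with_reducible assumption)
      | (rw [w_kept .rbp rfl]; with_reducible assumption)
      | u_resolve

end Vorbis.Spec.decode_residue_1b
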